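-- pv_equiv track=rewrite | github.com/Muktesh4636/a2 | backend/game/utils.py | determine_winning_number
-- ===== SOURCE A (Python) =====
-- from collections import Counter
--
-- def determine_winning_number(dice_values):
--     """
--     Determine the winning number for display.
--     Rule: A number must appear at least 2 times to win.
--     If multiple numbers win, only 1 is returned for display.
--     """
--     if not dice_values:
--         return None
--
--     counts = Counter(dice_values)
--     # Find numbers that appeared 2 or more times
--     winners = [num for num, count in counts.items() if count >= 2]
--
--     if not winners:
--         return None
--
--     # Find the maximum frequency among winners
--     max_freq = max(counts[num] for num in winners)
--
--     # Get all numbers that have this maximum frequency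
--     top_winners = [num for num in winners if counts[num] == max_freq]
--
--     # If there's a tie, pick only one.
--     # Since "there is no highest number rule", we'll just pick the first one
--     # that appeared in the original dice roll for consistency.
--     for val in dice_values:
--         if val in top_winners:
--             return str(val)
--
--     return str(top_winners[0])
-- ===== SOURCE B (Python) =====
-- from collections import Counter
--
-- def determine_winning_number(dice_values):
--     if not dice_values:
--         return None
--     counts = Counter(dice_values)
--     best_val = None
--     best_count = 0
--     for val in dice_values:
--         c = counts[val]
--         if c >= 2 and c > best_count:
--             best_val = val
--             best_count = c
--     return str(best_val) if best_val is not None else None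
-- ===== Notes on version B (the rewrite author's own statement) =====
-- stated objective: simpler
-- what changed: Replaces A's four-stage pipeline (winners list, max frequency, top_winners list, final scan) by a single ordered pass over dice_values tracking the best value with a strict-improvement update, which preserves the first-occurrence tie-break.
import Mathlib
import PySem

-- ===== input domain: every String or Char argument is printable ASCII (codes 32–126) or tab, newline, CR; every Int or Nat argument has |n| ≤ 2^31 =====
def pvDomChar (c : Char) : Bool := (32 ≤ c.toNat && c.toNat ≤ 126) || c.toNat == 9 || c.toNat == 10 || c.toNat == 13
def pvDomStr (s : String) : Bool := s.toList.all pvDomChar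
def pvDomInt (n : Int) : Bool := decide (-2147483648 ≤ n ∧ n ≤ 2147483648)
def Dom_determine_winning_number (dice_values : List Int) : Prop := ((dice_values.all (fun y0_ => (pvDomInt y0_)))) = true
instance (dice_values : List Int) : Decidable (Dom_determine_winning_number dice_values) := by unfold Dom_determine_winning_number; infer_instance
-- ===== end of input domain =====

-- B replaces A's winners-list / max-frequency / top-winners / final-scan pipeline by one
-- ordered strict-improvement pass over dice_values (objective: simpler).

-- ===== PORT A =====
def determine_winning_number (dice_values : List Int) : Option String :=
  if dice_values = [] then none
  else
    let counts := PySem.Dict.counter dice_values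
    let winners := (counts.items.filter (fun p => decide (2 ≤ p.2))).map (fun p => p.1)
    if winners = [] then none
    else
      let max_freq := (PySem.List.max? (winners.map (fun num => counts.getD num 0)) (fun x => x)).getD 0
      let top_winners := winners.filter (fun num => decide (counts.getD num 0 = max_freq))
      match dice_values.find? (fun val => top_winners.contains val) with
      | some val => some (PySem.Int.toStr val)
      | none => some (PySem.Int.toStr (top_winners.headD 0))
      -- the final branch ports 'return str(top_winners[0])'; it is unreachable (top_winners ⊆ dice_values)

-- ===== PORT B =====
def determine_winning_number_alt (dice_values : List Int) : Option String :=
  if dice_values = [] then none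
  else
    let counts := PySem.Dict.counter dice_values
    let r := dice_values.foldl (fun (s : Option Int × Int) val =>
        let c := counts.getD val 0
        if 2 ≤ c ∧ s.2 < c then (some val, c) else s) (none, 0)
    r.1.map PySem.Int.toStr

-- ===== PRECONDITION & SPEC =====
def Spec_determine_winning_number (dice_values : List Int) (out : Option String) : Prop := out = determine_winning_number_alt dice_values
instance (dice_values : List Int) (out : Option String) : Decidable (Spec_determine_winning_number dice_values out) := by unfold Spec_determine_winning_number; infer_instance

-- ===== CLAIM (what is proved, stated in full; the proofs are below) =====
def Claim_equal_determine_winning_number : Prop := ∀ (dice_values : List Int), Dom_determine_winning_number dice_values → Spec_determine_winning_number dice_values (determine_winning_number dice_values)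

-- ===== LEMMAS AND PROOFS =====

-- B's step function, abstracted over the count function
def pvStep (cnt : Int → Int) (s : Option Int × Int) (val : Int) : Option Int × Int :=
  let c := cnt val
  if 2 ≤ c ∧ s.2 < c then (some val, c) else s

-- once the best count is an upper bound of all remaining counts, the state never changes
lemma pv_stall (cnt : Int → Int) (m : Int) :
    ∀ (xs : List Int) (b : Option Int), (∀ v ∈ xs, cnt v ≤ m) →
      xs.foldl (pvStep cnt) (b, m) = (b, m) := by
  intro xs
  induction xs with
  | nil => intro b _; rfl
  | cons x t ih =>
    intro b h
    have hx : cnt x ≤ m := h x (by simp)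
    have : pvStep cnt (b, m) x = (b, m) := by
      unfold pvStep; simp only []
      rw [if_neg]; rintro ⟨_, h2⟩; omega
    simp only [List.foldl_cons, this]
    exact ih b (fun v hv => h v (by simp [hv]))

-- if no element has count ≥ 2, the state never changes
lemma pv_noup (cnt : Int → Int) :
    ∀ (xs : List Int) (s : Option Int × Int), (∀ v ∈ xs, ¬ 2 ≤ cnt v) →
      xs.foldl (pvStep cnt) s = s := by
  intro xs
  induction xs with
  | nil => intro s _; rfl
  | cons x t ih =>
    intro s h
    have : pvStep cnt s x = s := by
      unfold pvStep; simp only []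
      rw [if_neg]; rintro ⟨h1, _⟩; exact h x (by simp) h1
    simp only [List.foldl_cons, this]
    exact ih s (fun v hv => h v (by simp [hv]))

-- the fold ends on the first element whose count equals the maximum M
lemma pv_main (cnt : Int → Int) (M : Int) (hM : 2 ≤ M) :
    ∀ (xs : List Int) (b : Option Int) (bc : Int), bc < M →
      (∀ v ∈ xs, cnt v ≤ M) → (∃ v ∈ xs, cnt v = M) →
      (xs.foldl (pvStep cnt) (b, bc)).1 = xs.find? (fun v => decide (cnt v = M)) := by
  intro xs
  induction xs with
  | nil => rintro b bc _ _ ⟨v, hv, _⟩; exact absurd hv (by simp)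
  | cons x t ih =>
    intro b bc hbc hle hex
    by_cases hx : cnt x = M
    · have hstep : pvStep cnt (b, bc) x = (some x, M) := by
        unfold pvStep; simp only []
        rw [if_pos ⟨by omega, by omega⟩, hx]
      have hstall := pv_stall cnt M t (some x) (fun v hv => hle v (by simp [hv]))
      simp only [List.foldl_cons, hstep, hstall, List.find?_cons, hx, decide_true]
    · have hstep' : (pvStep cnt (b, bc) x).2 < M := by
        unfold pvStep; simp only []
        split
        · have := hle x (by simp); simp; omega
        · simpa using hbc
      obtain ⟨v, hv, hvM⟩ := hex
      have hvt : v ∈ t := by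
        rcases List.mem_cons.mp hv with h | h
        · exact absurd (h ▸ hvM) hx
        · exact h
      have := ih (pvStep cnt (b, bc) x).1 (pvStep cnt (b, bc) x).2 hstep'
        (fun v hv => hle v (by simp [hv])) ⟨v, hvt, hvM⟩
      simp only [List.foldl_cons, List.find?_cons, hx, decide_false]
      simpa using this

lemma pv_find_congr {α : Type} (p q : α → Bool) :
    ∀ (xs : List α), (∀ v ∈ xs, p v = q v) → xs.find? p = xs.find? q := by
  intro xs
  induction xs with
  | nil => intro _; rfl
  | cons x t ih =>
    intro h
    have hx := h x (by simp)
    simp only [List.find?_cons, hx]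
    cases q x
    · exact ih (fun v hv => h v (by simp [hv]))
    · rfl

theorem pv_equal (l : List Int) :
    determine_winning_number l = determine_winning_number_alt l := by
  by_cases hl : l = []
  · simp [determine_winning_number, determine_winning_number_alt, hl]
  · unfold determine_winning_number determine_winning_number_alt
    rw [if_neg hl, if_neg hl]
    simp only []
    set cnt : Int → Int := fun v => (PySem.Dict.counter l).getD v 0 with hcnt
    have hcnt' : ∀ v, cnt v = (l.count v : Int) := by
      intro v; rw [hcnt]; exact PySem.Dict.getD_counter l v
    -- characterise winners
    set winners := (((PySem.Dict.counter l).items.filter (fun p => decide (2 ≤ p.2))).map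
      (fun p => p.1)) with hwin
    have hw : winners = (PySem.Set.ofList l).filter (fun k => decide (2 ≤ cnt k)) := by
      rw [hwin, PySem.Dict.items_counter, List.filter_map, List.map_map]
      simp [Function.comp_def, hcnt']
    have hwmem : ∀ v, v ∈ winners ↔ v ∈ l ∧ 2 ≤ cnt v := by
      intro v; rw [hw]; simp [List.mem_filter, PySem.Set.mem_ofList]
    by_cases hwe : winners = []
    · -- no value occurs twice: both return none
      rw [if_pos hwe]
      have hno : ∀ v ∈ l, ¬ 2 ≤ cnt v := by
        intro v hv h2
        have : v ∈ winners := (hwmem v).mpr ⟨hv, h2⟩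
        simp [hwe] at this
      have : l.foldl (pvStep cnt) (none, 0) = (none, 0) := pv_noup cnt l _ hno
      show _ = (l.foldl (fun (s : Option Int × Int) val =>
          let c := (PySem.Dict.counter l).getD val 0
          if 2 ≤ c ∧ s.2 < c then (some val, c) else s) (none, 0)).1.map PySem.Int.toStr
      rw [show (fun (s : Option Int × Int) val =>
          let c := (PySem.Dict.counter l).getD val 0
          if 2 ≤ c ∧ s.2 < c then (some val, c) else s) = pvStep cnt from rfl, this]
      rfl
    · rw [if_neg hwe]
      set M := ((PySem.List.max? (winners.map (fun num => (PySem.Dict.counter l).getD num 0))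
        (fun x => x)).getD 0) with hMdef
      -- M is attained by some winner, bounds all counts, and M ≥ 2
      have hmap : winners.map (fun num => (PySem.Dict.counter l).getD num 0) ≠ [] := by
        simp [hwe]
      obtain ⟨m, hm⟩ : ∃ m, PySem.List.max? (winners.map (fun num => (PySem.Dict.counter l).getD num 0)) (fun x => x) = some m := by
        cases hmm : PySem.List.max? (winners.map (fun num => (PySem.Dict.counter l).getD num 0)) (fun x => x) with
        | none => exact absurd ((PySem.List.max?_eq_none_iff _ _).mp hmm) hmap
        | some m => exact ⟨m, rfl⟩
      have hMm : M = m := by rw [hMdef, hm]; rfl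
      have hmmem := PySem.List.max?_mem hm
      obtain ⟨w, hwW, hwM⟩ := List.mem_map.mp hmmem
      have hwMcnt : cnt w = M := by rw [hMm, ← hwM]
      have hwl : w ∈ l := ((hwmem w).mp hwW).1
      have hM2 : 2 ≤ M := by
        have := ((hwmem w).mp hwW).2; omega
      have hbound : ∀ v ∈ l, cnt v ≤ M := by
        intro v hv
        by_cases h2 : 2 ≤ cnt v
        · have hvW : v ∈ winners := (hwmem v).mpr ⟨hv, h2⟩
          have : cnt v ∈ winners.map (fun num => (PySem.Dict.counter l).getD num 0) :=
            List.mem_map.mpr ⟨v, hvW, rfl⟩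
          have := PySem.List.max?_isMax hm _ this
          simpa [hMm] using this
        · omega
      -- the find? predicates of A and B agree on l
      have hfind : l.find? (fun val => ((winners.filter
            (fun num => decide ((PySem.Dict.counter l).getD num 0 = M))).contains val))
          = l.find? (fun v => decide (cnt v = M)) := by
        apply pv_find_congr
        intro v hv
        simp only [List.contains_eq_mem, List.mem_filter, decide_eq_decide, decide_eq_true_eq]
        constructor
        · rintro ⟨_, h⟩; exact h
        · intro h; exact ⟨(hwmem v).mpr ⟨hv, by omega⟩, h⟩
      have hmain := pv_main cnt M hM2 l none 0 (by omega) hbound ⟨w, hwl, hwMcnt⟩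
      show (match l.find? (fun val => ((winners.filter
            (fun num => decide ((PySem.Dict.counter l).getD num 0 = M))).contains val)) with
        | some val => some (PySem.Int.toStr val)
        | none => some (PySem.Int.toStr ((winners.filter
            (fun num => decide ((PySem.Dict.counter l).getD num 0 = M))).headD 0))) =
        (l.foldl (fun (s : Option Int × Int) val =>
          let c := (PySem.Dict.counter l).getD val 0
          if 2 ≤ c ∧ s.2 < c then (some val, c) else s) (none, 0)).1.map PySem.Int.toStr
      rw [show (fun (s : Option Int × Int) val =>
          let c := (PySem.Dict.counter l).getD val 0
          if 2 ≤ c ∧ s.2 < c then (some val, c) else s) = pvStep cnt from rfl]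
      rw [hfind, ← hmain]
      obtain ⟨r, hr⟩ : ∃ r, (l.foldl (pvStep cnt) (none, 0)).1 = some r := by
        cases hrr : (l.foldl (pvStep cnt) (none, 0)).1 with
        | none =>
          rw [hmain] at hrr
          have := List.find?_eq_none.mp hrr w hwl
          simp [hwMcnt] at this
        | some r => exact ⟨r, rfl⟩
      rw [hr]; rfl

-- ===== VERDICT (by name: the statement is the Claim_ definition above) =====
theorem determine_winning_number_spec : Claim_equal_determine_winning_number := by
  intro l _
  unfold Spec_determine_winning_number
  exact pv_equal l
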